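-- pv_equiv track=rewrite | github.com/khanhvu4603/test_person_following | main_v3.py | pick_person_for_face
-- ===== SOURCE A (Python) =====
-- def center_of(box):
--     x1,y1,x2,y2 = box
--     return ( (x1+x2)//2, (y1+y2)//2 )
--
-- def pick_person_for_face(fbox, pboxes):
--     if not pboxes: return None
--     fcx,fcy = center_of(fbox)
--     containing = []
--     for i,(x1,y1,x2,y2) in enumerate(pboxes):
--         if x1<=fcx<=x2 and y1<=fcy<=y2:
--             containing.append((i,(x2-x1)*(y2-y1)))
--     if containing:
--         containing.sort(key=lambda t:-t[1])
--         return pboxes[containing[0][0]]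
--     def cdist(pb):
--         pcx,pcy = center_of(pb)
--         return abs(pcx-fcx) + abs(pcy-fcy)
--     return min(pboxes, key=cdist)
-- ===== SOURCE B (Python) =====
-- def pick_person_for_face(fbox, pboxes):
--     fcx = (fbox[0] + fbox[2]) // 2
--     fcy = (fbox[1] + fbox[3]) // 2
--     best_c = None  # (box, area): largest area among boxes containing the face center, first on ties
--     best_f = None  # (box, dist): smallest center Manhattan distance, first on ties
--     for b in pboxes:
--         x1, y1, x2, y2 = b
--         if x1 <= fcx <= x2 and y1 <= fcy <= y2:
--             a = (x2 - x1) * (y2 - y1)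
--             if best_c is None or a > best_c[1]:
--                 best_c = (b, a)
--         d = abs((x1 + x2) // 2 - fcx) + abs((y1 + y2) // 2 - fcy)
--         if best_f is None or d < best_f[1]:
--             best_f = (b, d)
--     if best_c is not None:
--         return best_c[0]
--     return best_f[0] if best_f is not None else None
-- ===== Notes on version B (the rewrite author's own statement) =====
-- stated objective: alternative
-- what changed: Replaced A's build-containing-list + stable descending sort + separate min() pass with one loop over pboxes that maintains two running bests (first strictly-largest-area containing box and first strictly-nearest-center box), no intermediate list and no sort.
import Mathlib
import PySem

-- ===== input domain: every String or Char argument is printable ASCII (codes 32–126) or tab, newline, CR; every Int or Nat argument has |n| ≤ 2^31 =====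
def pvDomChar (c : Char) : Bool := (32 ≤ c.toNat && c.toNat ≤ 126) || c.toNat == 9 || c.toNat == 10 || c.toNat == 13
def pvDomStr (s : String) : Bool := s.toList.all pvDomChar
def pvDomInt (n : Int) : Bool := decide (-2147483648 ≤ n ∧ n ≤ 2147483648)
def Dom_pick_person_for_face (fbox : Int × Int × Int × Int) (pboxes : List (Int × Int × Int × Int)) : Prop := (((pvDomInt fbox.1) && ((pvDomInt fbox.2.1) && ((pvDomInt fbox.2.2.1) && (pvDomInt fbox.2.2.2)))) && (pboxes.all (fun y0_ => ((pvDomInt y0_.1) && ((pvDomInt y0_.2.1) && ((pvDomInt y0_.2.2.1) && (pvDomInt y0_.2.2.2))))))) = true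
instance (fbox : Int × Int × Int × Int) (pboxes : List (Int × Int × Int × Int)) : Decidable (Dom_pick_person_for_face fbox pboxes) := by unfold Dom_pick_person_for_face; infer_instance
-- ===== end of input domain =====

-- B replaces A's build-list + stable sort + separate min() pass by ONE loop holding two
-- running bests (alternative single-pass decomposition; same return value, no side effects).

-- ===== PORT A =====
-- center_of(box) = ((x1+x2)//2, (y1+y2)//2)
def pvCenterOf (box : Int × Int × Int × Int) : Int × Int :=
  (PySem.Int.floordiv (box.1 + box.2.2.1) 2, PySem.Int.floordiv (box.2.1 + box.2.2.2) 2)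

def pick_person_for_face (fbox : Int × Int × Int × Int) (pboxes : List (Int × Int × Int × Int)) : Option (Int × Int × Int × Int) :=
  if pboxes = [] then none
  else
    let fc := pvCenterOf fbox
    -- for i,(x1,y1,x2,y2) in enumerate(pboxes): if contains: containing.append((i, area))
    let containing : List (Int × Int) :=
      (PySem.List.enumerate pboxes).foldl
        (fun acc p =>
          if p.2.1 ≤ fc.1 ∧ fc.1 ≤ p.2.2.2.1 ∧ p.2.2.1 ≤ fc.2 ∧ fc.2 ≤ p.2.2.2.2 then
            acc ++ [(p.1, (p.2.2.2.1 - p.2.1) * (p.2.2.2.2 - p.2.2.1))]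
          else acc) []
    if containing ≠ [] then
      -- containing.sort(key=lambda t:-t[1]); return pboxes[containing[0][0]]
      match PySem.List.sorted containing (fun t => -t.2) false with
      | [] => none   -- unreachable: containing ≠ []
      | t :: _ => PySem.List.pyGet? pboxes t.1
    else
      -- return min(pboxes, key=cdist)
      PySem.List.min? pboxes (fun pb => |(pvCenterOf pb).1 - fc.1| + |(pvCenterOf pb).2 - fc.2|)

-- ===== PORT B =====
def pick_person_for_face_alt (fbox : Int × Int × Int × Int) (pboxes : List (Int × Int × Int × Int)) : Option (Int × Int × Int × Int) :=
  let fcx := PySem.Int.floordiv (fbox.1 + fbox.2.2.1) 2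
  let fcy := PySem.Int.floordiv (fbox.2.1 + fbox.2.2.2) 2
  -- one pass: best_c = (box, area) with first strictly-largest area among containing boxes,
  --           best_f = (box, dist) with first strictly-smallest center Manhattan distance
  let st := pboxes.foldl
    (fun (s : Option ((Int × Int × Int × Int) × Int) × Option ((Int × Int × Int × Int) × Int)) b =>
      (if b.1 ≤ fcx ∧ fcx ≤ b.2.2.1 ∧ b.2.1 ≤ fcy ∧ fcy ≤ b.2.2.2 then
         let a := (b.2.2.1 - b.1) * (b.2.2.2 - b.2.1)
         match s.1 with
         | none => some (b, a)
         | some m => if a > m.2 then some (b, a) else s.1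
       else s.1,
       let d := |PySem.Int.floordiv (b.1 + b.2.2.1) 2 - fcx| + |PySem.Int.floordiv (b.2.1 + b.2.2.2) 2 - fcy|
       match s.2 with
       | none => some (b, d)
       | some m => if d < m.2 then some (b, d) else s.2))
    (none, none)
  match st.1 with
  | some m => some m.1
  | none => st.2.map Prod.fst

-- ===== PRECONDITION & SPEC =====
def Spec_pick_person_for_face (fbox : Int × Int × Int × Int) (pboxes : List (Int × Int × Int × Int)) (out : Option (Int × Int × Int × Int)) : Prop := out = pick_person_for_face_alt fbox pboxes
instance (fbox : Int × Int × Int × Int) (pboxes : List (Int × Int × Int × Int)) (out : Option (Int × Int × Int × Int)) : Decidable (Spec_pick_person_for_face fbox pboxes out) := by unfold Spec_pick_person_for_face; infer_instance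

-- ===== CLAIM (what is proved, stated in full; the proofs are below) =====
def Claim_equal_pick_person_for_face : Prop := ∀ (fbox : Int × Int × Int × Int) (pboxes : List (Int × Int × Int × Int)), Dom_pick_person_for_face fbox pboxes → Spec_pick_person_for_face fbox pboxes (pick_person_for_face fbox pboxes)

-- ===== LEMMAS AND PROOFS =====
def pvMinStep {α : Type} (key : α → Int) (o : Option α) (x : α) : Option α :=
  match o with
  | none => some x
  | some m => if key x < key m then some x else some m

theorem pv_min?_eq_foldl {α : Type} (key : α → Int) (l : List α) :
    PySem.List.min? l key = l.foldl (pvMinStep key) none := rfl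

theorem pv_head?_insertBy {α : Type} (bef : α → α → Bool) (x : α) (ys : List α) :
    (PySem.List.insertBy bef x ys).head? =
      some (match ys with | [] => x | y :: _ => if bef x y then x else y) := by
  cases ys with
  | nil => simp [PySem.List.insertBy]
  | cons y t => simp only [PySem.List.insertBy]; split <;> simp

theorem pv_head?_foldl_insertBy {α : Type} (key : α → Int) (xs : List α) :
    ∀ (acc : List α),
      (xs.foldl (fun acc x => PySem.List.insertBy (fun a b => decide (key a < key b)) x acc) acc).head?
        = xs.foldl (pvMinStep key) acc.head? := by
  induction xs with
  | nil => intro acc; rfl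
  | cons x t ih =>
    intro acc
    simp only [List.foldl_cons]
    rw [ih]
    congr 1
    cases acc with
    | nil => simp [PySem.List.insertBy, pvMinStep]
    | cons y r =>
      rw [pv_head?_insertBy]
      simp only [pvMinStep, List.head?]
      split <;> simp_all

-- head of Python's stable ascending sort = first element with minimal key
theorem pv_sorted_head?_eq_min? {α : Type} (key : α → Int) (xs : List α) :
    (PySem.List.sorted xs key false).head? = PySem.List.min? xs key := by
  have h := pv_head?_foldl_insertBy key xs []
  simpa [PySem.List.sorted, PySem.List.min?, pvMinStep] using h

theorem pv_foldl_minStep_map {α β : Type} (g : α → β) (key : β → Int) (xs : List α) :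
    ∀ (o : Option α),
      (xs.map g).foldl (pvMinStep key) (o.map g)
        = (xs.foldl (pvMinStep (fun a => key (g a))) o).map g := by
  induction xs with
  | nil => intro o; rfl
  | cons x t ih =>
    intro o
    simp only [List.map_cons, List.foldl_cons]
    have : pvMinStep key (o.map g) (g x) = (pvMinStep (fun a => key (g a)) o x).map g := by
      cases o <;> simp [pvMinStep] <;> split <;> simp
    rw [this, ih]

theorem pv_foldl_minStep_map_none {α β : Type} (g : α → β) (key : β → Int) (xs : List α) :
    (xs.map g).foldl (pvMinStep key) none
      = (xs.foldl (pvMinStep (fun a => key (g a))) none).map g := by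
  simpa using pv_foldl_minStep_map g key xs none

theorem pv_min?_map {α β : Type} (g : α → β) (key : β → Int) (xs : List α) :
    PySem.List.min? (xs.map g) key = (PySem.List.min? xs (fun a => key (g a))).map g := by
  simpa [PySem.List.min?, pvMinStep] using pv_foldl_minStep_map g key xs none

-- A's append-if loop builds filter + map
theorem pv_containing_eq {α : Type} (P : α → Prop) [DecidablePred P] (f : α → Int × Int)
    (l : List α) :
    ∀ (acc : List (Int × Int)),
      l.foldl (fun acc p => if P p then acc ++ [f p] else acc) acc
        = acc ++ (l.filter (fun p => decide (P p))).map f := by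
  induction l with
  | nil => intro acc; simp
  | cons p t ih =>
    intro acc
    by_cases h : P p
    · simp only [List.foldl_cons, List.filter_cons, if_pos h, decide_eq_true h, ih]
      simp
    · simp only [List.foldl_cons, List.filter_cons, if_neg h, decide_eq_false h, ih]
      simp

-- B's single pass = (first max-area containing box, first min-distance box), each as a min?-style fold
theorem pv_B_fold (P : (Int × Int × Int × Int) → Prop) [DecidablePred P]
    (dist : (Int × Int × Int × Int) → Int) (l : List (Int × Int × Int × Int)) :
    ∀ (o1 o2 : Option (Int × Int × Int × Int)),
      l.foldl (fun s b =>
          (if P b then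
             match s.1 with
             | none => some (b, (b.2.2.1 - b.1) * (b.2.2.2 - b.2.1))
             | some m => if (b.2.2.1 - b.1) * (b.2.2.2 - b.2.1) > m.2 then some (b, (b.2.2.1 - b.1) * (b.2.2.2 - b.2.1)) else s.1
           else s.1,
           match s.2 with
           | none => some (b, dist b)
           | some m => if dist b < m.2 then some (b, dist b) else s.2))
        (o1.map (fun b => (b, (b.2.2.1 - b.1) * (b.2.2.2 - b.2.1))),
         o2.map (fun b => (b, dist b)))
        = (((l.filter (fun b => decide (P b))).foldl
              (pvMinStep (fun b => -((b.2.2.1 - b.1) * (b.2.2.2 - b.2.1)))) o1).map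
              (fun b => (b, (b.2.2.1 - b.1) * (b.2.2.2 - b.2.1))),
           (l.foldl (pvMinStep dist) o2).map (fun b => (b, dist b))) := by
  induction l with
  | nil => intro o1 o2; rfl
  | cons b t ih =>
    intro o1 o2
    by_cases h : P b
    · simp only [List.foldl_cons, List.filter_cons, decide_eq_true h, if_pos h, if_true]
      have h2 : (match o2.map (fun b => (b, dist b)) with
          | none => some (b, dist b)
          | some m => if dist b < m.2 then some (b, dist b) else o2.map (fun b => (b, dist b)))
          = (pvMinStep dist o2 b).map (fun b => (b, dist b)) := by
        cases o2 with
        | none => rfl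
        | some m => simp only [Option.map_some, pvMinStep]; split <;> simp
      have h1 : (match o1.map (fun b => (b, (b.2.2.1 - b.1) * (b.2.2.2 - b.2.1))) with
          | none => some (b, (b.2.2.1 - b.1) * (b.2.2.2 - b.2.1))
          | some m => if (b.2.2.1 - b.1) * (b.2.2.2 - b.2.1) > m.2 then some (b, (b.2.2.1 - b.1) * (b.2.2.2 - b.2.1))
                      else o1.map (fun b => (b, (b.2.2.1 - b.1) * (b.2.2.2 - b.2.1))))
          = (pvMinStep (fun b => -((b.2.2.1 - b.1) * (b.2.2.2 - b.2.1))) o1 b).map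
              (fun b => (b, (b.2.2.1 - b.1) * (b.2.2.2 - b.2.1))) := by
        cases o1 with
        | none => rfl
        | some m =>
          simp only [Option.map_some, pvMinStep]
          have hiff : ((b.2.2.1 - b.1) * (b.2.2.2 - b.2.1) > (m.2.2.1 - m.1) * (m.2.2.2 - m.2.1))
              ↔ (-((b.2.2.1 - b.1) * (b.2.2.2 - b.2.1)) < -((m.2.2.1 - m.1) * (m.2.2.2 - m.2.1))) := by
            constructor <;> intro hx <;> omega
          by_cases hc : -((b.2.2.1 - b.1) * (b.2.2.2 - b.2.1)) < -((m.2.2.1 - m.1) * (m.2.2.2 - m.2.1))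
          · rw [if_pos (hiff.mpr hc), if_pos hc]; simp
          · rw [if_neg (fun hh => hc (hiff.mp hh)), if_neg hc]; simp
      rw [h1, h2, ih]
    · simp only [List.foldl_cons, List.filter_cons, decide_eq_false h, if_neg h, Bool.false_eq_true,
        if_false]
      have h2 : (match o2.map (fun b => (b, dist b)) with
          | none => some (b, dist b)
          | some m => if dist b < m.2 then some (b, dist b) else o2.map (fun b => (b, dist b)))
          = (pvMinStep dist o2 b).map (fun b => (b, dist b)) := by
        cases o2 with
        | none => rfl
        | some m => simp only [Option.map_some, pvMinStep]; split <;> simp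
      rw [h2, ih]

theorem pick_person_for_face_eq (fbox : Int × Int × Int × Int) (pboxes : List (Int × Int × Int × Int)) :
    pick_person_for_face fbox pboxes = pick_person_for_face_alt fbox pboxes := by
  by_cases hp : pboxes = []
  · subst hp; rfl
  · simp only [pick_person_for_face, pick_person_for_face_alt, if_neg hp]
    rw [pv_containing_eq, List.nil_append]
    have hB := pv_B_fold (fun b : Int × Int × Int × Int =>
        b.1 ≤ PySem.Int.floordiv (fbox.1 + fbox.2.2.1) 2 ∧
        PySem.Int.floordiv (fbox.1 + fbox.2.2.1) 2 ≤ b.2.2.1 ∧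
        b.2.1 ≤ PySem.Int.floordiv (fbox.2.1 + fbox.2.2.2) 2 ∧
        PySem.Int.floordiv (fbox.2.1 + fbox.2.2.2) 2 ≤ b.2.2.2)
      (fun b : Int × Int × Int × Int =>
        |PySem.Int.floordiv (b.1 + b.2.2.1) 2 - PySem.Int.floordiv (fbox.1 + fbox.2.2.1) 2| +
        |PySem.Int.floordiv (b.2.1 + b.2.2.2) 2 - PySem.Int.floordiv (fbox.2.1 + fbox.2.2.2) 2|) pboxes none none
    simp only [Option.map_none] at hB
    rw [hB]
    have hPA : (fun p : Int × (Int × Int × Int × Int) =>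
        decide (p.2.1 ≤ (pvCenterOf fbox).1 ∧ (pvCenterOf fbox).1 ≤ p.2.2.2.1 ∧
                p.2.2.1 ≤ (pvCenterOf fbox).2 ∧ (pvCenterOf fbox).2 ≤ p.2.2.2.2))
        = (fun p : Int × (Int × Int × Int × Int) =>
        decide (p.2.1 ≤ PySem.Int.floordiv (fbox.1 + fbox.2.2.1) 2 ∧
                PySem.Int.floordiv (fbox.1 + fbox.2.2.1) 2 ≤ p.2.2.2.1 ∧
                p.2.2.1 ≤ PySem.Int.floordiv (fbox.2.1 + fbox.2.2.2) 2 ∧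
                PySem.Int.floordiv (fbox.2.1 + fbox.2.2.2) 2 ≤ p.2.2.2.2)) := by
      funext p; simp [pvCenterOf]
    rw [hPA]
    have hdist : (fun pb : Int × Int × Int × Int =>
        |(pvCenterOf pb).1 - (pvCenterOf fbox).1| + |(pvCenterOf pb).2 - (pvCenterOf fbox).2|)
        = (fun b : Int × Int × Int × Int =>
        |PySem.Int.floordiv (b.1 + b.2.2.1) 2 - PySem.Int.floordiv (fbox.1 + fbox.2.2.1) 2| +
        |PySem.Int.floordiv (b.2.1 + b.2.2.2) 2 - PySem.Int.floordiv (fbox.2.1 + fbox.2.2.2) 2|) := by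
      funext b; simp [pvCenterOf]
    rw [hdist]
    have hfilt : List.filter (fun b : Int × Int × Int × Int =>
        decide (b.1 ≤ PySem.Int.floordiv (fbox.1 + fbox.2.2.1) 2 ∧
                PySem.Int.floordiv (fbox.1 + fbox.2.2.1) 2 ≤ b.2.2.1 ∧
                b.2.1 ≤ PySem.Int.floordiv (fbox.2.1 + fbox.2.2.2) 2 ∧
                PySem.Int.floordiv (fbox.2.1 + fbox.2.2.2) 2 ≤ b.2.2.2)) pboxes
        = (List.filter (fun p : Int × (Int × Int × Int × Int) =>
        decide (p.2.1 ≤ PySem.Int.floordiv (fbox.1 + fbox.2.2.1) 2 ∧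
                PySem.Int.floordiv (fbox.1 + fbox.2.2.1) 2 ≤ p.2.2.2.1 ∧
                p.2.2.1 ≤ PySem.Int.floordiv (fbox.2.1 + fbox.2.2.2) 2 ∧
                PySem.Int.floordiv (fbox.2.1 + fbox.2.2.2) 2 ≤ p.2.2.2.2))
          (PySem.List.enumerate pboxes)).map (fun p => p.2) := by
      conv_lhs => rw [← PySem.List.map_snd_enumerate pboxes 0]
      rw [List.filter_map]
      simp only [Function.comp_def]
    rw [hfilt, pv_foldl_minStep_map_none]
    by_cases hE : List.filter (fun p : Int × (Int × Int × Int × Int) =>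
        decide (p.2.1 ≤ PySem.Int.floordiv (fbox.1 + fbox.2.2.1) 2 ∧
                PySem.Int.floordiv (fbox.1 + fbox.2.2.1) 2 ≤ p.2.2.2.1 ∧
                p.2.2.1 ≤ PySem.Int.floordiv (fbox.2.1 + fbox.2.2.2) 2 ∧
                PySem.Int.floordiv (fbox.2.1 + fbox.2.2.2) 2 ≤ p.2.2.2.2))
        (PySem.List.enumerate pboxes) = []
    · rw [hE]
      simp only [List.map_nil, List.foldl_nil, Option.map_none, ne_eq, not_true_eq_false, if_false]
      rw [pv_min?_eq_foldl]
      cases hx : List.foldl (pvMinStep (fun b : Int × Int × Int × Int =>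
          |PySem.Int.floordiv (b.1 + b.2.2.1) 2 - PySem.Int.floordiv (fbox.1 + fbox.2.2.1) 2| +
          |PySem.Int.floordiv (b.2.1 + b.2.2.2) 2 - PySem.Int.floordiv (fbox.2.1 + fbox.2.2.2) 2|)) none pboxes <;>
        simp
    · have hne : List.map (fun p : Int × (Int × Int × Int × Int) =>
          (p.1, (p.2.2.2.1 - p.2.1) * (p.2.2.2.2 - p.2.2.1)))
          (List.filter (fun p : Int × (Int × Int × Int × Int) =>
            decide (p.2.1 ≤ PySem.Int.floordiv (fbox.1 + fbox.2.2.1) 2 ∧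
                    PySem.Int.floordiv (fbox.1 + fbox.2.2.1) 2 ≤ p.2.2.2.1 ∧
                    p.2.2.1 ≤ PySem.Int.floordiv (fbox.2.1 + fbox.2.2.2) 2 ∧
                    PySem.Int.floordiv (fbox.2.1 + fbox.2.2.2) 2 ≤ p.2.2.2.2))
            (PySem.List.enumerate pboxes)) ≠ [] := by
        simpa [List.map_eq_nil_iff] using hE
      rw [if_pos hne]
      have hh := pv_sorted_head?_eq_min? (fun t : Int × Int => -t.2)
        (List.map (fun p : Int × (Int × Int × Int × Int) =>
          (p.1, (p.2.2.2.1 - p.2.1) * (p.2.2.2.2 - p.2.2.1)))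
          (List.filter (fun p : Int × (Int × Int × Int × Int) =>
            decide (p.2.1 ≤ PySem.Int.floordiv (fbox.1 + fbox.2.2.1) 2 ∧
                    PySem.Int.floordiv (fbox.1 + fbox.2.2.1) 2 ≤ p.2.2.2.1 ∧
                    p.2.2.1 ≤ PySem.Int.floordiv (fbox.2.1 + fbox.2.2.2) 2 ∧
                    PySem.Int.floordiv (fbox.2.1 + fbox.2.2.2) 2 ≤ p.2.2.2.2))
            (PySem.List.enumerate pboxes)))
      rw [pv_min?_map] at hh
      have hkey : (fun a : Int × (Int × Int × Int × Int) =>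
          -(a.1, (a.2.2.2.1 - a.2.1) * (a.2.2.2.2 - a.2.2.1)).2)
          = (fun a : Int × (Int × Int × Int × Int) => -((a.2.2.2.1 - a.2.1) * (a.2.2.2.2 - a.2.2.1))) := rfl
      rw [hkey] at hh
      rw [← pv_min?_eq_foldl]
      cases hmE : PySem.List.min? (List.filter (fun p : Int × (Int × Int × Int × Int) =>
            decide (p.2.1 ≤ PySem.Int.floordiv (fbox.1 + fbox.2.2.1) 2 ∧
                    PySem.Int.floordiv (fbox.1 + fbox.2.2.1) 2 ≤ p.2.2.2.1 ∧
                    p.2.2.1 ≤ PySem.Int.floordiv (fbox.2.1 + fbox.2.2.2) 2 ∧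
                    PySem.Int.floordiv (fbox.2.1 + fbox.2.2.2) 2 ≤ p.2.2.2.2))
          (PySem.List.enumerate pboxes)) (fun a : Int × (Int × Int × Int × Int) => -((a.2.2.2.1 - a.2.1) * (a.2.2.2.2 - a.2.2.1))) with
      | none => exact absurd ((PySem.List.min?_eq_none_iff _ _).mp hmE) hE
      | some m =>
        rw [hmE] at hh
        obtain ⟨k, hk2, hmk⟩ := (PySem.List.mem_enumerate_iff pboxes 0 m).mp
          (List.mem_of_mem_filter (PySem.List.min?_mem hmE))
        cases hs : PySem.List.sorted (List.map (fun p : Int × (Int × Int × Int × Int) => (p.1, (p.2.2.2.1 - p.2.1) * (p.2.2.2.2 - p.2.2.1)))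
            (List.filter (fun p : Int × (Int × Int × Int × Int) =>
            decide (p.2.1 ≤ PySem.Int.floordiv (fbox.1 + fbox.2.2.1) 2 ∧
                    PySem.Int.floordiv (fbox.1 + fbox.2.2.1) 2 ≤ p.2.2.2.1 ∧
                    p.2.2.1 ≤ PySem.Int.floordiv (fbox.2.1 + fbox.2.2.2) 2 ∧
                    PySem.Int.floordiv (fbox.2.1 + fbox.2.2.2) 2 ≤ p.2.2.2.2)) (PySem.List.enumerate pboxes)))
            (fun t : Int × Int => -t.2) false with
        | nil => rw [hs] at hh; simp at hh
        | cons t r =>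
          rw [hs] at hh
          simp only [List.head?_cons, Option.map_some, Option.some.injEq] at hh
          simp [hh, hmk, PySem.List.pyGet?_natCast, List.getElem?_eq_getElem hk2]


-- ===== VERDICT (by name: the statement is the Claim_ definition above) =====
theorem pick_person_for_face_spec : Claim_equal_pick_person_for_face := by
  intro fbox pboxes _
  show pick_person_for_face fbox pboxes = pick_person_for_face_alt fbox pboxes
  exact pick_person_for_face_eq fbox pboxes
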